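-- pv_equiv track=rewrite | github.com/JuyeolRyu/CodingTest | 백수/algorithm/etc/프로그래머스 월간챌린지.py | solution
-- ===== SOURCE A (Python) =====
-- def solution(s):
--     s = list(s)
--     answer = 0
--     def isValid():
--         x,y,z =0,0,0
--         for c in s:
--             if (c == ']' and x == 0) or (c == ')' and y == 0) or (c == '}' and z == 0):
--                 return False
--             if c == '[':
--                 x += 1
--             elif c == '(':
--                 y+=1
--             elif c == '{':
--                 z+=1
--             elif c == ']':
--                 x -= 1
--             elif c == ')':
--                 y-=1
--             elif c == '}':
--                 z-=1
--         if x == 0 and y ==0 and z ==0: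
--             return True
--         else:
--             return False
--     if isValid():
--         answer += 1
--     for i in range(1,len(s)):
--         tmp = s.pop(0)
--         s.append(tmp)
--         if isValid():
--             answer += 1
--     return answer
-- ===== SOURCE B (Python) =====
-- def solution(s):
--     # O(n): a rotation starting at i is balanced per type iff every type's
--     # prefix sum attains its global minimum at i (and totals are zero).
--     if not s:
--         return 1
--     x = y = z = 0
--     P = []
--     for c in s:
--         P.append((x, y, z))
--         if c == '[':
--             x += 1
--         elif c == '(':
--             y += 1
--         elif c == '{':
--             z += 1
--         elif c == ']':
--             x -= 1
--         elif c == ')':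
--             y -= 1
--         elif c == '}':
--             z -= 1
--     if (x, y, z) != (0, 0, 0):
--         return 0
--     mx = min(p[0] for p in P)
--     my = min(p[1] for p in P)
--     mz = min(p[2] for p in P)
--     return sum(1 for p in P if p == (mx, my, mz))
-- ===== Notes on version B (the rewrite author's own statement) =====
-- stated objective: faster
-- what changed: A re-runs the full balance check on every rotation (pop/append then rescan); B makes one pass computing the three per-type prefix sums and counts the positions where all three simultaneously attain their global minimum, which characterises the balanced rotations.
import Mathlib
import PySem

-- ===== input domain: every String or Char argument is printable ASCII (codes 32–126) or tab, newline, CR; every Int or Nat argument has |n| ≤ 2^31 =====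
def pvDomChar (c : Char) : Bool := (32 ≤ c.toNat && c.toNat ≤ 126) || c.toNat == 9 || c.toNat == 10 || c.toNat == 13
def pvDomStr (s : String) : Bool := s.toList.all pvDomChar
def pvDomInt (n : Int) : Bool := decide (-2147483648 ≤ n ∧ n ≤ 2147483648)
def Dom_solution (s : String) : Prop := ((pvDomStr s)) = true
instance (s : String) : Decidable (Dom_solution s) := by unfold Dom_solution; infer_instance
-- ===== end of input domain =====

-- B replaces A's check of every rotation (O(n^2)) by one prefix-sum pass:
-- a rotation is balanced iff all three per-type prefix sums attain their minimum there.

-- ===== PORT A =====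
-- the nested helper isValid() of A, on the current list with counters x,y,z
def isValidGo : List Char → Int → Int → Int → Bool
  | [], x, y, z => x == 0 && y == 0 && z == 0
  | c :: rest, x, y, z =>
    if (c == ']' && x == 0) || (c == ')' && y == 0) || (c == '}' && z == 0) then false
    else if c == '[' then isValidGo rest (x + 1) y z
    else if c == '(' then isValidGo rest x (y + 1) z
    else if c == '{' then isValidGo rest x y (z + 1)
    else if c == ']' then isValidGo rest (x - 1) y z
    else if c == ')' then isValidGo rest x (y - 1) z
    else if c == '}' then isValidGo rest x y (z - 1)
    else isValidGo rest x y z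

-- loop body: tmp = s.pop(0); s.append(tmp)  (s is nonempty whenever the loop runs,
-- so pop(0)+append is exactly drop 1 ++ take 1); then re-check isValid
def stepA (st : List Char × Int) (_i : Int) : List Char × Int :=
  let s' := st.1.drop 1 ++ st.1.take 1
  (s', if isValidGo s' 0 0 0 then st.2 + 1 else st.2)

def solution (s : String) : Int :=
  let l0 := s.toList
  let answer0 : Int := if isValidGo l0 0 0 0 then 1 else 0
  let st := (PySem.List.pyRange 1 (l0.length : Int) 1).foldl stepA (l0, answer0)
  st.2

-- ===== PORT B =====
-- min() of a nonempty list (B only applies it to nonempty generators)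
def minList : List Int → Int
  | [] => 0
  | a :: r => r.foldl min a

-- loop body of B: record the prefix triple, then update the counters
def stepB (st : (Int × Int × Int) × List (Int × Int × Int)) (c : Char) :
    (Int × Int × Int) × List (Int × Int × Int) :=
  let x := st.1.1; let y := st.1.2.1; let z := st.1.2.2
  let P := st.2 ++ [(x, y, z)]
  if c == '[' then ((x + 1, y, z), P)
  else if c == '(' then ((x, y + 1, z), P)
  else if c == '{' then ((x, y, z + 1), P)
  else if c == ']' then ((x - 1, y, z), P)
  else if c == ')' then ((x, y - 1, z), P)
  else if c == '}' then ((x, y, z - 1), P)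
  else ((x, y, z), P)

def solution_alt (s : String) : Int :=
  if s.toList = [] then 1
  else
    let st := s.toList.foldl stepB ((0, 0, 0), [])
    if st.1 ≠ ((0 : Int), (0 : Int), (0 : Int)) then 0
    else
      let P := st.2
      let mx := minList (P.map (fun p => p.1))
      let my := minList (P.map (fun p => p.2.1))
      let mz := minList (P.map (fun p => p.2.2))
      P.foldl (fun acc p => if p = (mx, my, mz) then acc + 1 else acc) 0

-- ===== PRECONDITION & SPEC =====
def Spec_solution (s : String) (out : Int) : Prop := out = solution_alt s
instance (s : String) (out : Int) : Decidable (Spec_solution s out) := by unfold Spec_solution; infer_instance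

-- ===== CLAIM (what is proved, stated in full; the proofs are below) =====
def Claim_equal_solution : Prop := ∀ (s : String), Dom_solution s → Spec_solution s (solution s)

-- ===== LEMMAS AND PROOFS =====

-- per-type bracket weights
def f0 (c : Char) : Int := if c = '[' then 1 else if c = ']' then -1 else 0
def f1 (c : Char) : Int := if c = '(' then 1 else if c = ')' then -1 else 0
def f2 (c : Char) : Int := if c = '{' then 1 else if c = '}' then -1 else 0

def S (f : Char → Int) (l : List Char) : Int := (l.map f).sum

def M (f : Char → Int) : List Char → Int
  | [] => 0
  | c :: l => min 0 (f c + M f l)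

def rot (k : Nat) (l : List Char) : List Char := l.drop k ++ l.take k

theorem M_nonpos (f : Char → Int) (l : List Char) : M f l ≤ 0 := by
  cases l with
  | nil => simp [M]
  | cons c t => simp [M]

theorem S_nil (f : Char → Int) : S f [] = 0 := by simp [S]
theorem S_cons (f : Char → Int) (c : Char) (l : List Char) : S f (c :: l) = f c + S f l := by
  simp [S]
theorem S_append (f : Char → Int) (a b : List Char) : S f (a ++ b) = S f a + S f b := by
  simp [S]

theorem M_append (f : Char → Int) (a b : List Char) :
    M f (a ++ b) = min (M f a) (S f a + M f b) := by
  induction a with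
  | nil => have := M_nonpos f b; simp [M, S_nil]; omega
  | cons c t ih =>
    simp only [List.cons_append, M, ih, S_cons]
    omega

theorem validGo_iff (l : List Char) : ∀ (x y z : Int), 0 ≤ x → 0 ≤ y → 0 ≤ z →
    (isValidGo l x y z = true ↔
      (x + S f0 l = 0 ∧ y + S f1 l = 0 ∧ z + S f2 l = 0 ∧
       0 ≤ x + M f0 l ∧ 0 ≤ y + M f1 l ∧ 0 ≤ z + M f2 l)) := by
  induction l with
  | nil => intro x y z hx hy hz; simp [isValidGo, S_nil, M]; omega
  | cons c t ih =>
    intro x y z hx hy hz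
    have h0 := M_nonpos f0 t
    have h1 := M_nonpos f1 t
    have h2 := M_nonpos f2 t
    by_cases hc1 : c = '['
    · subst hc1
      rw [show isValidGo ('[' :: t) x y z = isValidGo t (x + 1) y z from by
        simp [isValidGo]]
      rw [ih (x + 1) y z (by omega) hy hz]
      simp [S_cons, M, f0, f1, f2]; omega
    by_cases hc2 : c = '('
    · subst hc2
      rw [show isValidGo ('(' :: t) x y z = isValidGo t x (y + 1) z from by
        simp [isValidGo]]
      rw [ih x (y + 1) z hx (by omega) hz]
      simp [S_cons, M, f0, f1, f2]; omega
    by_cases hc3 : c = '{'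
    · subst hc3
      rw [show isValidGo ('{' :: t) x y z = isValidGo t x y (z + 1) from by
        simp [isValidGo]]
      rw [ih x y (z + 1) hx hy (by omega)]
      simp [S_cons, M, f0, f1, f2]; omega
    by_cases hc4 : c = ']'
    · subst hc4
      by_cases hx0 : x = 0
      · subst hx0
        rw [show isValidGo (']' :: t) 0 y z = false from by simp [isValidGo]]
        simp [S_cons, M, f0]; omega
      · rw [show isValidGo (']' :: t) x y z = isValidGo t (x - 1) y z from by
          simp [isValidGo, hx0]]
        rw [ih (x - 1) y z (by omega) hy hz]
        simp [S_cons, M, f0, f1, f2]; omega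
    by_cases hc5 : c = ')'
    · subst hc5
      by_cases hy0 : y = 0
      · subst hy0
        rw [show isValidGo (')' :: t) x 0 z = false from by simp [isValidGo, hc1, hc4]]
        simp [S_cons, M, f1]; omega
      · rw [show isValidGo (')' :: t) x y z = isValidGo t x (y - 1) z from by
          simp [isValidGo, hy0]]
        rw [ih x (y - 1) z hx (by omega) hz]
        simp [S_cons, M, f0, f1, f2]; omega
    by_cases hc6 : c = '}'
    · subst hc6
      by_cases hz0 : z = 0
      · subst hz0
        rw [show isValidGo ('}' :: t) x y 0 = false from by simp [isValidGo, hc1, hc2, hc4, hc5]]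
        simp [S_cons, M, f2]; omega
      · rw [show isValidGo ('}' :: t) x y z = isValidGo t x y (z - 1) from by
          simp [isValidGo, hz0]]
        rw [ih x y (z - 1) hx hy (by omega)]
        simp [S_cons, M, f0, f1, f2]; omega
    · rw [show isValidGo (c :: t) x y z = isValidGo t x y z from by
        simp [isValidGo, hc1, hc2, hc3, hc4, hc5, hc6]]
      rw [ih x y z hx hy hz]
      simp [S_cons, M, f0, f1, f2, hc1, hc2, hc3, hc4, hc5, hc6]
      omega

theorem valid_iff (l : List Char) :
    isValidGo l 0 0 0 = true ↔
      (S f0 l = 0 ∧ S f1 l = 0 ∧ S f2 l = 0 ∧ 0 ≤ M f0 l ∧ 0 ≤ M f1 l ∧ 0 ≤ M f2 l) := by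
  have := validGo_iff l 0 0 0 le_rfl le_rfl le_rfl
  simpa using this

theorem S_rot (f : Char → Int) (k : Nat) (l : List Char) : S f (rot k l) = S f l := by
  unfold rot
  rw [S_append]
  conv_rhs => rw [← List.take_append_drop k l]
  rw [S_append]
  omega

theorem M_rot (f : Char → Int) (k : Nat) (l : List Char) (hS : S f l = 0) :
    M f (rot k l) = M f l - S f (l.take k) := by
  have hdecomp : l = l.take k ++ l.drop k := (List.take_append_drop k l).symm
  have hsum : S f (l.take k) + S f (l.drop k) = 0 := by
    rw [← S_append, ← hdecomp]; exact hS
  have hMl : M f l = min (M f (l.take k)) (S f (l.take k) + M f (l.drop k)) := by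
    conv_lhs => rw [hdecomp]
    rw [M_append]
  unfold rot
  rw [M_append, hMl]
  omega

theorem rot_zero (l : List Char) : rot 0 l = l := by simp [rot]

theorem rot_succ (k : Nat) (l : List Char) (h : k < l.length) :
    rot (k + 1) l = (rot k l).drop 1 ++ (rot k l).take 1 := by
  have hd : l.drop k = l[k] :: l.drop (k + 1) := List.drop_eq_getElem_cons h
  have ht : l.take (k + 1) = l.take k ++ [l[k]] := by
    rw [List.take_succ, List.getElem?_eq_getElem h]; rfl
  unfold rot
  rw [ht, hd]
  rw [← List.append_assoc]
  rfl

theorem len_pos {l : List Char} (h : l ≠ []) : 1 ≤ l.length := by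
  cases l with
  | nil => exact absurd rfl h
  | cons a t => simp

-- a foldl that ignores its elements is iteration
theorem foldl_ignore_iterate {α β : Type} (g : α → α) (xs : List β) (init : α) :
    xs.foldl (fun st _ => g st) init = g^[xs.length] init := by
  induction xs generalizing init with
  | nil => rfl
  | cons b t ih => simp [List.foldl_cons, ih, Function.iterate_succ_apply]

-- A's loop invariant
theorem A_iter (l : List Char) (a0 : Int) :
    ∀ (k : Nat), k ≤ l.length →
      (fun st : List Char × Int => stepA st 0)^[k] (l, a0) =
        (rot k l, a0 + ((List.range k).countP (fun i => isValidGo (rot (i + 1) l) 0 0 0) : Int)) := by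
  intro k
  induction k with
  | zero => intro _; simp [rot_zero]
  | succ k ih =>
    intro hk
    have hk' : k ≤ l.length := by omega
    have hklt : k < l.length := by omega
    rw [Function.iterate_succ_apply', ih hk']
    show stepA _ 0 = _
    unfold stepA
    rw [← rot_succ k l hklt]
    simp only [List.range_succ, List.countP_append, List.countP_cons, List.countP_nil]
    by_cases hv : isValidGo (rot (k + 1) l) 0 0 0 = true
    · simp [hv]; push_cast; ring
    · simp [hv, Bool.eq_false_iff.mpr hv]

theorem A_val (s : String) (h : s.toList ≠ []) :
    solution s = ((List.range s.toList.length).countP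
      (fun i => isValidGo (rot i s.toList) 0 0 0) : Int) := by
  set l := s.toList with hl
  have hn : 1 ≤ l.length := len_pos h
  have hsol : solution s = ((PySem.List.pyRange 1 (l.length : Int) 1).foldl stepA
      (l, if isValidGo l 0 0 0 then 1 else 0)).2 := rfl
  rw [hsol]
  have hfold : (PySem.List.pyRange 1 (l.length : Int) 1).foldl stepA (l, if isValidGo l 0 0 0 then 1 else 0)
      = (fun st : List Char × Int => stepA st 0)^[(PySem.List.pyRange 1 (l.length : Int) 1).length]
          (l, if isValidGo l 0 0 0 then 1 else 0) := by
    exact foldl_ignore_iterate _ _ _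
  have hlen : (PySem.List.pyRange 1 (l.length : Int) 1).length = l.length - 1 := by
    rw [PySem.List.length_pyRange_one]
    omega
  rw [hfold, hlen, A_iter l _ (l.length - 1) (by omega)]
  simp only []
  -- combine the initial check (rotation 0) with the loop's rotations 1..n-1
  have hrange : List.range l.length = 0 :: (List.range (l.length - 1)).map (· + 1) := by
    have : l.length = (l.length - 1) + 1 := by omega
    rw [this, List.range_succ_eq_map]
    simp [Nat.succ_eq_add_one]
  rw [hrange]
  rw [List.countP_cons, List.countP_map]
  by_cases hv : isValidGo l 0 0 0 = true
  · simp only [Function.comp_def, rot_zero, hv, if_true]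
    push_cast
    omega
  · simp only [Function.comp_def, rot_zero, hv, Bool.eq_false_iff.mpr hv, if_false]
    push_cast
    omega

-- B's loop invariant: the step function, evaluated
theorem stepB_eval (st : (Int × Int × Int) × List (Int × Int × Int)) (c : Char) :
    stepB st c = ((st.1.1 + f0 c, st.1.2.1 + f1 c, st.1.2.2 + f2 c), st.2 ++ [(st.1.1, st.1.2.1, st.1.2.2)]) := by
  unfold stepB f0 f1 f2
  by_cases h1 : c = '[' <;> by_cases h2 : c = '(' <;> by_cases h3 : c = '{' <;>
    by_cases h4 : c = ']' <;> by_cases h5 : c = ')' <;> by_cases h6 : c = '}' <;>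
    simp_all <;> omega

theorem B_fold (l : List Char) : ∀ (x y z : Int) (P : List (Int × Int × Int)),
    l.foldl stepB ((x, y, z), P) =
      ((x + S f0 l, y + S f1 l, z + S f2 l),
       P ++ (List.range l.length).map (fun i => (x + S f0 (l.take i), y + S f1 (l.take i), z + S f2 (l.take i)))) := by
  induction l with
  | nil => intro x y z P; simp [S_nil]
  | cons c t ih =>
    intro x y z P
    rw [List.foldl_cons, stepB_eval]
    simp only
    rw [ih]
    simp only [S_cons, List.length_cons, List.range_succ_eq_map, List.map_cons, List.map_map,
      List.take_zero, List.take_succ_cons, S_nil, add_zero, List.append_assoc,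
      List.singleton_append, Function.comp_def]
    simp [add_assoc]

-- minList facts
theorem minList_cons (a : Int) (r : List Int) : minList (a :: r) = r.foldl min a := rfl

theorem minList_le {X : List Int} {v : Int} (hv : v ∈ X) : minList X ≤ v := by
  cases X with
  | nil => simp at hv
  | cons a r =>
    rw [minList_cons]
    rcases List.mem_cons.mp hv with h | h
    · subst h; exact (PySem.List.foldl_min_le r v).1
    · exact (PySem.List.foldl_min_le r a).2 v h

theorem minList_mem {X : List Int} (hX : X ≠ []) : minList X ∈ X := by
  cases X with
  | nil => exact absurd rfl hX
  | cons a r =>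
    rw [minList_cons]
    rcases PySem.List.foldl_min_mem r a with h | h
    · rw [h]; exact List.mem_cons_self
    · exact List.mem_cons_of_mem a h

theorem M_le_prefix (f : Char → Int) (l : List Char) : ∀ (i : Nat), M f l ≤ S f (l.take i) := by
  induction l with
  | nil => intro i; simp [M, S_nil]
  | cons c t ih =>
    intro i
    cases i with
    | zero => simpa [S_nil] using M_nonpos f (c :: t)
    | succ i =>
      rw [List.take_succ_cons, S_cons]
      have := ih i
      simp only [M]
      omega

theorem M_attained (f : Char → Int) (l : List Char) : ∃ i ≤ l.length, M f l = S f (l.take i) := by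
  induction l with
  | nil => exact ⟨0, by simp, by simp [M, S_nil]⟩
  | cons c t ih =>
    obtain ⟨j, hj, hje⟩ := ih
    rcases min_cases 0 (f c + M f t) with ⟨hmin, _⟩ | ⟨hmin, _⟩
    · exact ⟨0, by simp, by simp [M, hmin, S_nil]⟩
    · refine ⟨j + 1, by simp; omega, ?_⟩
      rw [List.take_succ_cons, S_cons, ← hje]
      simp only [M]
      exact hmin

theorem min_prefix (f : Char → Int) (l : List Char) (hl : l ≠ []) (hS : S f l = 0) :
    minList ((List.range l.length).map (fun i => S f (l.take i))) = M f l := by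
  set X := (List.range l.length).map (fun i => S f (l.take i)) with hX
  have hn : 1 ≤ l.length := len_pos hl
  have hXne : X ≠ [] := by
    rw [hX]
    simp [List.map_eq_nil_iff, List.range_eq_nil]
    omega
  have hmemX : M f l ∈ X := by
    obtain ⟨j, hj, hje⟩ := M_attained f l
    by_cases hjn : j = l.length
    · have : M f l = 0 := by rw [hje, hjn, List.take_length, hS]
      rw [hX]
      refine List.mem_map.mpr ⟨0, List.mem_range.mpr (by omega), ?_⟩
      simp [this, S_nil]
    · rw [hX]
      exact List.mem_map.mpr ⟨j, List.mem_range.mpr (by omega), hje.symm⟩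
  have h1 : minList X ≤ M f l := minList_le hmemX
  have h2 : M f l ≤ minList X := by
    obtain ⟨i, hi, hie⟩ := List.mem_map.mp (minList_mem hXne)
    rw [← hie]
    exact M_le_prefix f l i
  omega

theorem countB (P : List (Int × Int × Int)) (m : Int × Int × Int) :
    P.foldl (fun acc p => if p = m then acc + 1 else acc) (0 : Int) = (P.countP (fun p => p = m) : Int) := by
  simpa using PySem.List.foldl_ite_add_one (fun p => p = m) P 0

-- ===== VERDICT (by name: the statement is the Claim_ definition above) =====
theorem solution_spec : Claim_equal_solution := by
  unfold Claim_equal_solution Spec_solution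
  intro s _
  by_cases hnil : s.toList = []
  · unfold solution solution_alt
    rw [hnil]
    simp [isValidGo, PySem.List.pyRange_one_eq_nil]
  · set l := s.toList with hl
    set n := l.length with hn
    have hn1 : 1 ≤ n := len_pos hnil
    rw [A_val s hnil]
    unfold solution_alt
    rw [← hl, if_neg hnil]
    rw [B_fold l 0 0 0 []]
    simp only [zero_add, List.nil_append, ← hn]
    by_cases hZ : S f0 l = 0 ∧ S f1 l = 0 ∧ S f2 l = 0
    · obtain ⟨hZ0, hZ1, hZ2⟩ := hZ
      rw [if_neg (by simp [hZ0, hZ1, hZ2])]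
      simp only [List.map_map]
      rw [countB]
      rw [List.countP_map]
      simp only [Function.comp_def]
      have hm0 : minList ((List.range n).map (fun i => S f0 (l.take i))) = M f0 l := by
        rw [hn]; exact min_prefix f0 l hnil hZ0
      have hm1 : minList ((List.range n).map (fun i => S f1 (l.take i))) = M f1 l := by
        rw [hn]; exact min_prefix f1 l hnil hZ1
      have hm2 : minList ((List.range n).map (fun i => S f2 (l.take i))) = M f2 l := by
        rw [hn]; exact min_prefix f2 l hnil hZ2
      simp only [hm0, hm1, hm2]
      congr 1
      apply List.countP_congr
      intro i hi
      have hiff : isValidGo (rot i l) 0 0 0 = true ↔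
          ((S f0 (l.take i), S f1 (l.take i), S f2 (l.take i)) : Int × Int × Int) = (M f0 l, M f1 l, M f2 l) := by
        rw [valid_iff, S_rot, S_rot, S_rot,
          M_rot f0 i l hZ0, M_rot f1 i l hZ1, M_rot f2 i l hZ2]
        have a0 := M_le_prefix f0 l i
        have a1 := M_le_prefix f1 l i
        have a2 := M_le_prefix f2 l i
        simp only [Prod.mk.injEq, hZ0, hZ1, hZ2, true_and]
        omega
      rw [Bool.eq_iff_iff, hiff, decide_eq_true_eq]
      simp
    · rw [if_pos (by simp; intro h1 h2 h3; exact hZ ⟨h1, h2, h3⟩)]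
      simp only [Int.natCast_eq_zero]
      rw [List.countP_eq_zero]
      intro i _
      intro hv
      rw [valid_iff] at hv
      rw [S_rot, S_rot, S_rot] at hv
      exact hZ ⟨hv.1, hv.2.1, hv.2.2.1⟩
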